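-- pv_equiv track=rewrite | github.com/advr0106/dead_ant_count | dead_ant_counter.py | dead_ant_count
-- ===== SOURCE A (Python) =====
-- def dead_ant_count(ants):
--     if ants is None:
--         return 0
--
--     a_count, n_count, t_count = 0, 0, 0
--
--     i = 0
--     while i < len(ants):
--         if ants[i:i+3] == 'ant':
--             i += 3
--         else:
--             if ants[i] == 'a':
--                 a_count += 1
--             elif ants[i] == 'n':
--                 n_count += 1
--             elif ants[i] == 't':
--                 t_count += 1
--             i += 1
--     return max(a_count, n_count, t_count)
-- ===== SOURCE B (Python) =====
-- def dead_ant_count(ants):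
--     if ants is None:
--         return 0
--     s = ants.replace('ant', '')
--     return max(s.count('a'), s.count('n'), s.count('t'))
-- ===== Notes on version B (the rewrite author's own statement) =====
-- stated objective: faster
-- what changed: Replaces A's interleaved Python-level index loop (manual 3-char slice check plus three running counters) with a removal phase done by one str.replace call followed by three str.count passes and one max.
import Mathlib
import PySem

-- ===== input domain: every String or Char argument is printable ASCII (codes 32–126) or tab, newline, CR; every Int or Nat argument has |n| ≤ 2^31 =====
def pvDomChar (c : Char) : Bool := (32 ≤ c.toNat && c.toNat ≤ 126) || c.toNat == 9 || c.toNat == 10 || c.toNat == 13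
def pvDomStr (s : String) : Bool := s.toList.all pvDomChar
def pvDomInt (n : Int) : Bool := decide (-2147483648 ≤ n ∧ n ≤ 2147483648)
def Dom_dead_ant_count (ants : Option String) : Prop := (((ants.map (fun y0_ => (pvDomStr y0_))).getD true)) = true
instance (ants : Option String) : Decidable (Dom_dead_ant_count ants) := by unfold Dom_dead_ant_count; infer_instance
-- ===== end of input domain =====

-- B replaces A's interleaved Python-level index loop (manual 3-char slice check plus three
-- running counters) with one str.replace removal pass followed by three str.count passes
-- (faster by a constant factor: the work moves into C-level string primitives).

-- ===== PORT A =====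
-- A's while loop over index i with slice test ants[i:i+3] == 'ant', as structural
-- recursion on the remaining character list (slice equality = prefix test on the remainder).
def dead_ant_count_loop : List Char → Int → Int → Int → Int
  | [], a, n, t => max a (max n t)
  | c :: rest, a, n, t =>
    if ['a', 'n', 't'].isPrefixOf (c :: rest) then
      dead_ant_count_loop ((c :: rest).drop 3) a n t
    else if c = 'a' then dead_ant_count_loop rest (a + 1) n t
    else if c = 'n' then dead_ant_count_loop rest a (n + 1) t
    else if c = 't' then dead_ant_count_loop rest a n (t + 1)
    else dead_ant_count_loop rest a n t
  termination_by l _ _ _ => l.length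
  decreasing_by all_goals simp [List.length_drop]

def dead_ant_count (ants : Option String) : Int :=
  match ants with
  | none => 0
  | some s => dead_ant_count_loop s.toList 0 0 0

-- ===== PORT B =====
def dead_ant_count_alt (ants : Option String) : Int :=
  match ants with
  | none => 0
  | some s =>
    let r := PySem.Str.replace s "ant" ""
    max ((PySem.Str.count r "a" : Int)) (max ((PySem.Str.count r "n" : Int)) ((PySem.Str.count r "t" : Int)))

-- ===== PRECONDITION & SPEC =====
def Spec_dead_ant_count (ants : Option String) (out : Int) : Prop := out = dead_ant_count_alt ants
instance (ants : Option String) (out : Int) : Decidable (Spec_dead_ant_count ants out) := by unfold Spec_dead_ant_count; infer_instance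

-- ===== CLAIM (what is proved, stated in full; the proofs are below) =====
def Claim_equal_dead_ant_count : Prop := ∀ (ants : Option String), Dom_dead_ant_count ants → Spec_dead_ant_count ants (dead_ant_count ants)

-- ===== LEMMAS AND PROOFS =====

-- The result of removing non-overlapping 'ant' left-to-right (what replace computes).
def remAnt : List Char → List Char
  | [] => []
  | c :: rest =>
    if ['a', 'n', 't'].isPrefixOf (c :: rest) then remAnt ((c :: rest).drop 3)
    else c :: remAnt rest
  termination_by l => l.length
  decreasing_by all_goals simp [List.length_drop]

theorem replace_go_eq_remAnt (fuel : Nat) (l acc : List Char) (h : l.length ≤ fuel) :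
    PySem.Chars.replace.go ['a', 'n', 't'] [] fuel l acc = acc.reverse ++ remAnt l := by
  induction fuel generalizing l acc with
  | zero =>
    have : l = [] := List.length_eq_zero_iff.mp (Nat.le_zero.mp h)
    subst this
    simp [PySem.Chars.replace.go, remAnt]
  | succ fuel ih =>
    cases l with
    | nil => simp [PySem.Chars.replace.go, remAnt]
    | cons c rest =>
      rw [PySem.Chars.replace.go, remAnt]
      split
      · rw [ih]
        · simp
        · simp at h ⊢; omega
      · rw [ih]
        · simp
        · simp at h ⊢; omega

theorem count_go_eq_count (ch : Char) (fuel : Nat) (l : List Char) (acc : Nat)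
    (h : l.length ≤ fuel) :
    PySem.Chars.count.go [ch] fuel l acc = acc + l.count ch := by
  induction fuel generalizing l acc with
  | zero =>
    have : l = [] := List.length_eq_zero_iff.mp (Nat.le_zero.mp h)
    subst this
    simp [PySem.Chars.count.go]
  | succ fuel ih =>
    cases l with
    | nil => simp [PySem.Chars.count.go]
    | cons c rest =>
      rw [PySem.Chars.count.go]
      simp only [List.isPrefixOf, Bool.and_true]
      split <;> rename_i hp
      · have hc : ch = c := by
          simpa using (of_decide_eq_true (by simpa [List.isPrefixOf] using hp))
        rw [ih]
        · subst hc; simp; omega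
        · simp at h ⊢; omega
      · have hc : ¬ ch = c := by
          intro he
          exact absurd (by simp [he]) hp
        rw [ih]
        · simp [Ne.symm hc]
        · simp at h; omega

theorem chars_count_single (ch : Char) (l : List Char) :
    PySem.Chars.count l [ch] = l.count ch := by
  rw [PySem.Chars.count]
  simp [count_go_eq_count ch l.length l 0 (le_refl _)]

theorem loop_eq_remAnt (l : List Char) (a n t : Int) :
    dead_ant_count_loop l a n t =
      max (a + ((remAnt l).count 'a' : Int))
        (max (n + ((remAnt l).count 'n' : Int)) (t + ((remAnt l).count 't' : Int))) := by
  fun_induction dead_ant_count_loop l a n t with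
  | case1 a n t => simp [remAnt]
  | case2 c rest a n t hp ih =>
    rw [remAnt]; simp only [hp, if_pos]; exact ih
  | case3 rest a n t hp ih =>
    rw [remAnt]; simp only [hp]
    rw [ih]; simp; omega
  | case4 rest a n t hp hc1 ih =>
    rw [remAnt]; simp only [hp]
    rw [ih]; simp [hc1]; omega
  | case5 rest a n t hp hc1 hc2 ih =>
    rw [remAnt]; simp only [hp]
    rw [ih]; simp [hc1, hc2]; omega
  | case6 c rest a n t hp hc1 hc2 hc3 ih =>
    rw [remAnt]; simp only [hp]
    rw [ih]
    simp [hc1, hc2, hc3]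

theorem replace_ant_toList (s : String) :
    (PySem.Str.replace s "ant" "").toList = remAnt s.toList := by
  rw [PySem.Str.toList_replace]
  have h := replace_go_eq_remAnt s.toList.length s.toList [] (le_refl _)
  simpa [PySem.Chars.replace] using h

-- ===== VERDICT (by name: the statement is the Claim_ definition above) =====
theorem dead_ant_count_spec : Claim_equal_dead_ant_count := by
  intro ants _
  unfold Spec_dead_ant_count dead_ant_count dead_ant_count_alt
  cases ants with
  | none => rfl
  | some s =>
    simp only []
    rw [loop_eq_remAnt]
    have hcnt : ∀ ch : Char,
        PySem.Chars.count (PySem.Str.replace s "ant" "").toList [ch]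
          = (remAnt s.toList).count ch := by
      intro ch
      rw [replace_ant_toList, chars_count_single]
    simp only [PySem.Str.count_eq, show ("a".toList = ['a']) from rfl,
      show ("n".toList = ['n']) from rfl, show ("t".toList = ['t']) from rfl,
      hcnt 'a', hcnt 'n', hcnt 't']
    omega
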